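-- pv_equiv track=rewrite | github.com/Alehanderio/applyPython | lab2/task5.py | generate_min_max_numbers
-- ===== SOURCE A (Python) =====
-- def generate_min_max_numbers(input_number):
--     if 1000 <= input_number <= 9999:
--         digits = [int(digit) for digit in str(input_number)]
--
--         sorted_digits = sorted(digits, key=lambda x: (x != 0, x))
--         no_zeros = [digit for digit in sorted_digits if digit != 0]
--
--         if (len(no_zeros) < 4):
--             no_zeros[1:1]=[0]*(4-len(no_zeros))
--         min_number = int(''.join(map(str, no_zeros)))
--
--         max_number = int(''.join(map(str, sorted(digits, reverse=True))))
--
--         return min_number, max_number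
--     else:
--         raise ValueError("Please enter a four-digit positive number.")
-- ===== SOURCE B (Python) =====
-- def generate_min_max_numbers(input_number):
--     if not (1000 <= input_number <= 9999):
--         raise ValueError("Please enter a four-digit positive number.")
--     q, d4 = divmod(input_number, 10)
--     q, d3 = divmod(q, 10)
--     d1, d2 = divmod(q, 10)
--     p, q, r, s = sorted([d1, d2, d3, d4])
--     max_number = ((s * 10 + r) * 10 + q) * 10 + p
--     # the smallest nonzero digit leads the minimum; zeros follow, then the rest ascending
--     if p != 0:
--         min_number = ((p * 10 + q) * 10 + r) * 10 + s
--     elif q != 0: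
--         min_number = ((q * 10 + p) * 10 + r) * 10 + s
--     elif r != 0:
--         min_number = ((r * 10 + p) * 10 + q) * 10 + s
--     else:
--         min_number = ((s * 10 + p) * 10 + q) * 10 + r
--     return min_number, max_number
-- ===== Notes on version B (the rewrite author's own statement) =====
-- stated objective: alternative
-- what changed: B extracts the four digits arithmetically with divmod instead of parsing str(n), sorts them plainly ascending once, and assembles both answers by Horner arithmetic (max from the reversed order, min by a branch chain that puts the smallest nonzero digit first), replacing A's custom-key sort, zero filter, slice-insert and string join-and-reparse.
import Mathlib
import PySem

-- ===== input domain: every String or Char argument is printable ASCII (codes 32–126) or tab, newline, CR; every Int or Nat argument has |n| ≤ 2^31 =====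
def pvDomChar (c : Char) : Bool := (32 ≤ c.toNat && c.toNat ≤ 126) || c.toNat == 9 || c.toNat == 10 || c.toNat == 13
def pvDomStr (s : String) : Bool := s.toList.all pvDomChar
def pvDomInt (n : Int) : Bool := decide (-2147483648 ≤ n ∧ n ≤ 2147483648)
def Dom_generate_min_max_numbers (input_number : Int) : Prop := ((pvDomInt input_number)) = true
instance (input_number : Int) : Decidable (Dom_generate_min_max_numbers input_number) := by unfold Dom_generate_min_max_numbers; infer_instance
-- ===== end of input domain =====

-- B replaces A's str-parse / key-sort / zero-filter / slice-insert / string-join-and-reparse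
-- pipeline by divmod digit extraction, a plain ascending sort with a leading-nonzero swap,
-- and Horner-style arithmetic assembly of both numbers (objective: alternative, no strings).


-- ===== PORT A =====
-- A's pipeline after the digit-list comprehension (kept verbatim, step for step)
def pvACore (digits : List Int) : Int × Int :=
  -- sorted(digits, key=lambda x: (x != 0, x))
  let sorted_digits := PySem.List.sorted2 digits (fun x => x != 0) (fun x => x)
  let no_zeros := sorted_digits.filter (fun d => d != 0)
  -- no_zeros[1:1] = [0]*(4-len(no_zeros))  when len < 4
  let no_zeros :=
    if no_zeros.length < 4 then
      no_zeros.take 1 ++ List.replicate (4 - no_zeros.length) 0 ++ no_zeros.drop 1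
    else no_zeros
  -- int(''.join(map(str, …))); getD 0 never fires: the joined string is a nonempty digit string
  let min_number := (PySem.Int.ofChars? (PySem.Chars.join [] (no_zeros.map PySem.Int.toChars))).getD 0
  let max_number := (PySem.Int.ofChars? (PySem.Chars.join []
    ((PySem.List.sorted digits (fun x => x) true).map PySem.Int.toChars))).getD 0
  (min_number, max_number)

def generate_min_max_numbers (input_number : Int) : Int × Int :=
  if 1000 ≤ input_number ∧ input_number ≤ 9999 then
    -- digits = [int(digit) for digit in str(input_number)]; getD 0 never fires: every char is a digit
    pvACore ((PySem.Int.toChars input_number).map (fun c => (PySem.Int.ofChars? [c]).getD 0))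
  else (0, 0)  -- Python raises ValueError here; excluded by Pre_

-- ===== PORT B =====
-- B's pipeline on the four extracted digits (kept verbatim, step for step);
-- the '_ => (0, 0)' arm is unreachable: sorting a 4-element list yields 4 elements
def pvBCore (d1 d2 d3 d4 : Int) : Int × Int :=
  -- p, q, r, s = sorted([d1, d2, d3, d4])
  match PySem.List.sorted [d1, d2, d3, d4] (fun x => x) false with
  | [p, q, r, s] =>
    let max_number := ((s * 10 + r) * 10 + q) * 10 + p
    -- the smallest nonzero digit leads the minimum; zeros follow, then the rest ascending
    let min_number :=
      if p ≠ 0 then ((p * 10 + q) * 10 + r) * 10 + s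
      else if q ≠ 0 then ((q * 10 + p) * 10 + r) * 10 + s
      else if r ≠ 0 then ((r * 10 + p) * 10 + q) * 10 + s
      else ((s * 10 + p) * 10 + q) * 10 + r
    (min_number, max_number)
  | _ => (0, 0)

def generate_min_max_numbers_alt (input_number : Int) : Int × Int :=
  if 1000 ≤ input_number ∧ input_number ≤ 9999 then
    -- q, d4 = divmod(input_number, 10); q, d3 = divmod(q, 10); d1, d2 = divmod(q, 10)
    let q := PySem.Int.floordiv input_number 10
    let d4 := PySem.Int.mod input_number 10
    let q' := PySem.Int.floordiv q 10
    let d3 := PySem.Int.mod q 10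
    let d1 := PySem.Int.floordiv q' 10
    let d2 := PySem.Int.mod q' 10
    pvBCore d1 d2 d3 d4
  else (0, 0)  -- Python raises ValueError here; excluded by Pre_

-- ===== PRECONDITION & SPEC =====
-- Pre_ excludes exactly the inputs outside 1000..9999, on which A raises ValueError (B raises too).
def Pre_generate_min_max_numbers (input_number : Int) : Prop :=
  1000 ≤ input_number ∧ input_number ≤ 9999
instance (input_number : Int) : Decidable (Pre_generate_min_max_numbers input_number) := by
  unfold Pre_generate_min_max_numbers; infer_instance

def pvWitness_generate_min_max_numbers : Int := (1009)

def Spec_generate_min_max_numbers (input_number : Int) (out : Int × Int) : Prop := out = generate_min_max_numbers_alt input_number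
instance (input_number : Int) (out : Int × Int) : Decidable (Spec_generate_min_max_numbers input_number out) := by unfold Spec_generate_min_max_numbers; infer_instance

-- ===== CLAIM (what is proved, stated in full; the proofs are below) =====
def Claim_equal_generate_min_max_numbers : Prop := ∀ (input_number : Int), Dom_generate_min_max_numbers input_number → Pre_generate_min_max_numbers input_number → Spec_generate_min_max_numbers input_number (generate_min_max_numbers input_number)

-- ===== LEMMAS AND PROOFS =====

-- Nat.toDigitsCore is fuel-insensitive once the fuel covers the number of digits
lemma pv_fuel_irrel : ∀ (n f1 f2 : Nat) (ds : List Char), 0 < f1 → 0 < f2 →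
    n < 10 ^ f1 → n < 10 ^ f2 →
    Nat.toDigitsCore 10 f1 n ds = Nat.toDigitsCore 10 f2 n ds := by
  intro n
  induction n using Nat.strong_induction_on with
  | _ n ih =>
    intro f1 f2 ds h1 h2 hb1 hb2
    obtain ⟨g1, rfl⟩ : ∃ g1, f1 = g1 + 1 := ⟨f1 - 1, by omega⟩
    obtain ⟨g2, rfl⟩ : ∃ g2, f2 = g2 + 1 := ⟨f2 - 1, by omega⟩
    simp only [Nat.toDigitsCore]
    by_cases hz : n / 10 = 0
    · simp [hz]
    · simp only [hz, if_false]
      have hlt : n / 10 < n := Nat.div_lt_self (by omega) (by omega)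
      have hg1 : 0 < g1 := by
        by_contra hcon
        have hg0 : g1 = 0 := by omega
        rw [hg0] at hb1
        norm_num at hb1
        omega
      have hg2 : 0 < g2 := by
        by_contra hcon
        have hg0 : g2 = 0 := by omega
        rw [hg0] at hb2
        norm_num at hb2
        omega
      apply ih (n / 10) hlt g1 g2 _ hg1 hg2
      · have : 10 ^ (g1 + 1) = 10 ^ g1 * 10 := by ring
        omega
      · have : 10 ^ (g2 + 1) = 10 ^ g2 * 10 := by ring
        omega

lemma pv_toDigits_four (m : Nat) (h1 : 1000 ≤ m) (h2 : m ≤ 9999) :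
    Nat.toDigits 10 m =
      [Nat.digitChar (m / 10 / 10 / 10 % 10), Nat.digitChar (m / 10 / 10 % 10),
       Nat.digitChar (m / 10 % 10), Nat.digitChar (m % 10)] := by
  have e0 : Nat.toDigits 10 m = Nat.toDigitsCore 10 4 m [] := by
    unfold Nat.toDigits
    apply pv_fuel_irrel m (m + 1) 4 [] (by omega) (by omega)
    · calc m < 10 ^ 4 := by omega
        _ ≤ 10 ^ (m + 1) := Nat.pow_le_pow_right (by omega) (by omega)
    · omega
  rw [e0]
  have d1 : m / 10 ≠ 0 := by omega
  have d2 : m / 10 / 10 ≠ 0 := by omega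
  have d3 : m / 10 / 10 / 10 ≠ 0 := by omega
  have d4 : m / 10 / 10 / 10 / 10 = 0 := by omega
  simp only [Nat.toDigitsCore, d1, d2, d3, d4, if_false, if_true]

-- int(c) on a single decimal digit character parses back the digit
lemma pv_parse_digitChar : ∀ (x : Nat), x < 10 →
    PySem.Int.ofChars? [Nat.digitChar x] = some (x : Int) := by decide

-- the two cores agree on every digit quadruple with a nonzero leading digit
set_option maxRecDepth 1000000 in
set_option maxHeartbeats 40000000 in
lemma pv_core_eq : ∀ (a : Nat), a < 9 → ∀ (b : Nat), b < 10 → ∀ (c : Nat), c < 10 →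
    ∀ (d : Nat), d < 10 →
    pvACore [(a : Int) + 1, (b : Int), (c : Int), (d : Int)] = pvBCore ((a : Int) + 1) b c d := by
  decide

-- ===== VERDICT (by name: the statement is the Claim_ definition above) =====
theorem generate_min_max_numbers_spec : Claim_equal_generate_min_max_numbers := by
  intro n _ hp
  obtain ⟨h1, h2⟩ := hp
  show generate_min_max_numbers n = generate_min_max_numbers_alt n
  obtain ⟨m, rfl⟩ : ∃ m : Nat, n = (m : Int) := ⟨n.toNat, by omega⟩
  have hm1 : 1000 ≤ m := by exact_mod_cast h1
  have hm2 : m ≤ 9999 := by exact_mod_cast h2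
  have hcond : (1000 : Int) ≤ (m : Int) ∧ (m : Int) ≤ 9999 := ⟨h1, h2⟩
  have hA : generate_min_max_numbers (m : Int) =
      pvACore [((m / 10 / 10 / 10 % 10 : Nat) : Int), ((m / 10 / 10 % 10 : Nat) : Int),
               ((m / 10 % 10 : Nat) : Int), ((m % 10 : Nat) : Int)] := by
    rw [generate_min_max_numbers, if_pos hcond]
    have htc : PySem.Int.toChars (m : Int) = Nat.toDigits 10 m := by
      simp [PySem.Int.toChars, Int.not_lt.mpr (by positivity : (0 : Int) ≤ (m : Int))]
    rw [htc, pv_toDigits_four m hm1 hm2]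
    have p1 := pv_parse_digitChar (m / 10 / 10 / 10 % 10) (by omega)
    have p2 := pv_parse_digitChar (m / 10 / 10 % 10) (by omega)
    have p3 := pv_parse_digitChar (m / 10 % 10) (by omega)
    have p4 := pv_parse_digitChar (m % 10) (by omega)
    simp only [List.map, p1, p2, p3, p4, Option.getD_some]
  have hB : generate_min_max_numbers_alt (m : Int) =
      pvBCore ((m / 10 / 10 / 10 : Nat) : Int) ((m / 10 / 10 % 10 : Nat) : Int)
              ((m / 10 % 10 : Nat) : Int) ((m % 10 : Nat) : Int) := by
    rw [generate_min_max_numbers_alt, if_pos hcond]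
    simp only [PySem.Int.floordiv_eq_ediv_of_pos (show (0:Int) < 10 by omega),
      PySem.Int.mod_eq_emod_of_pos (show (0:Int) < 10 by omega)]
    congr 1
  have hmod : m / 10 / 10 / 10 % 10 = m / 10 / 10 / 10 := by omega
  rw [hA, hB, hmod]
  have hcore := pv_core_eq (m / 10 / 10 / 10 - 1) (by omega) (m / 10 / 10 % 10) (by omega)
    (m / 10 % 10) (by omega) (m % 10) (by omega)
  have ecast : ((m / 10 / 10 / 10 - 1 : Nat) : Int) + 1 = ((m / 10 / 10 / 10 : Nat) : Int) := by
    omega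
  rw [ecast] at hcore
  exact hcore
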